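-- pv_equiv track=rewrite | github.com/ashwinkumarm/CTCI | concepts/check1.py | splitInteger
-- ===== SOURCE A (Python) =====
-- def splitInteger(num,parts):
--     rem = num % parts
--     q = int (num / parts)
--     if rem == 0:
--         return [q for i in range(parts)]
--     else:
--         res = [q for i in range(parts)]
--         i = 0
--         while rem > 0:
--             res[i] = res[i] + 1
--             i += 1
--             rem -= 1
--         return res
-- ===== SOURCE B (Python) =====
-- def splitInteger(num, parts):
--     res = []
--     while parts > 0:
--         first = -((-num) // parts)  # ceiling division: largest-remainder part first
--         res.append(first)
--         num -= first
--         parts -= 1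
--     return res
-- ===== Notes on version B (the rewrite author's own statement) =====
-- stated objective: alternative
-- what changed: B replaces A's quotient/remainder table construction (build [q]*parts, then a while loop incrementing the first rem entries) with a greedy recursion that peels one ceiling-sized part -((-num)//parts) at a time and recurses on the remaining amount and parts-1.
-- intended difference: On negative num not divisible by positive parts, A mixes the truncated quotient int(num/parts) with the floored remainder num % parts so its parts sum to num+parts (A(-7,3)=[-1,-1,-2], sum -4); B returns [-2,-2,-3], a partition actually summing to num, which is the intended split. — e.g. on splitInteger(-7, 3): A returns [-1, -1, -2], B returns [-2, -2, -3]
import Mathlib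
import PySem

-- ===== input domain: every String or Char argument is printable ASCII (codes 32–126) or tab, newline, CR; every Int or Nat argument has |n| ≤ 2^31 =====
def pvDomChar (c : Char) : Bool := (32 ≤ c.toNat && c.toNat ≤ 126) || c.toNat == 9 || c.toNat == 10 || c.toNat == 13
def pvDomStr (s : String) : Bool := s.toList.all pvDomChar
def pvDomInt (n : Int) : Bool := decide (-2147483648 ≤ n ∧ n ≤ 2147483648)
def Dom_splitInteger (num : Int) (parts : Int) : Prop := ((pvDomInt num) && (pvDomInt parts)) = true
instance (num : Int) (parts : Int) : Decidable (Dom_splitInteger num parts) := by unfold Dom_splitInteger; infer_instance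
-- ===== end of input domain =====

-- B replaces A's quotient/remainder table-filling with a greedy recursion that peels one
-- ceiling-sized part at a time and recurses on what is left; on negative num not divisible by
-- positive parts A's parts do not sum to num and B's do (see D_ below).

-- ===== PORT A =====
-- the while loop: 'while rem > 0: res[i] += 1; i += 1; rem -= 1'; under Pre_ (parts ≠ 0)
-- the index i is always in range (0 ≤ rem < parts when parts > 0, loop body unreached otherwise),
-- so List.set / getD are exact here.
def pvIncLoop : List Int → Nat → Nat → List Int
  | res, _, 0 => res
  | res, i, r + 1 => pvIncLoop (res.set i (res.getD i 0 + 1)) (i + 1) r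

def splitInteger (num : Int) (parts : Int) : List Int :=
  let rem := PySem.Int.mod num parts
  -- int(num / parts): float division truncated toward zero; PySem.Int.truncdiv is exact for |num|,|parts| < 2^53, which Dom guarantees
  let q := PySem.Int.truncdiv num parts
  if rem = 0 then
    (PySem.List.pyRange 0 parts 1).map (fun _ => q)
  else
    let res := (PySem.List.pyRange 0 parts 1).map (fun _ => q)
    pvIncLoop res 0 rem.toNat

-- ===== PORT B =====
-- Source B's 'while parts > 0' loop over the state (num, parts, res); the Nat argument is pure fuel
-- (always parts.toNat at the top-level call), making the loop structurally recursive.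
def pvSplitBAcc : Nat → Int → Int → List Int → List Int
  | 0, _, _, res => res
  | n + 1, num, parts, res =>
      if parts ≤ 0 then res
      else
        let first := -(PySem.Int.floordiv (-num) parts)   -- ceiling division -((-num) // parts)
        pvSplitBAcc n (num - first) (parts - 1) (res ++ [first])

def splitInteger_alt (num : Int) (parts : Int) : List Int :=
  pvSplitBAcc parts.toNat num parts []

-- ===== PRECONDITION & SPEC =====
-- parts = 0 makes the Python A raise ZeroDivisionError
def Pre_splitInteger (num : Int) (parts : Int) : Prop := parts ≠ 0
instance (num : Int) (parts : Int) : Decidable (Pre_splitInteger num parts) := by unfold Pre_splitInteger; infer_instance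
def pvWitness_splitInteger : Int × Int := (7, 3)

-- On negative num not divisible by positive parts, A uses the truncated quotient int(num/parts)
-- with the floored remainder num % parts, so its parts sum to num + parts (e.g. A(-7,3) = [-1,-1,-2],
-- summing to -4); B returns the partition actually summing to num ([-2,-2,-3]), the intended split.
def D_splitInteger (num : Int) (parts : Int) : Prop := num < 0 ∧ 0 < parts ∧ ¬ (parts ∣ num)
instance (num : Int) (parts : Int) : Decidable (D_splitInteger num parts) := by unfold D_splitInteger; infer_instance

def Spec_splitInteger (num : Int) (parts : Int) (out : List Int) : Prop := ¬ D_splitInteger num parts → out = splitInteger_alt num parts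
instance (num : Int) (parts : Int) (out : List Int) : Decidable (Spec_splitInteger num parts out) := by unfold Spec_splitInteger; infer_instance

def pvDiffWitness_splitInteger : Int × Int := (-7, 3)
def pvDiffWitnessOut_splitInteger : (List Int) × (List Int) := ([-1, -1, -2], [-2, -2, -3])

-- ===== CLAIM =====
def Claim_unchanged_splitInteger : Prop := ∀ (num : Int) (parts : Int), Dom_splitInteger num parts → Pre_splitInteger num parts → Spec_splitInteger num parts (splitInteger num parts)
def Claim_changed_splitInteger : Prop := Dom_splitInteger (pvDiffWitness_splitInteger.1) (pvDiffWitness_splitInteger.2) ∧ Pre_splitInteger (pvDiffWitness_splitInteger.1) (pvDiffWitness_splitInteger.2) ∧ D_splitInteger (pvDiffWitness_splitInteger.1) (pvDiffWitness_splitInteger.2) ∧ splitInteger (pvDiffWitness_splitInteger.1) (pvDiffWitness_splitInteger.2) = pvDiffWitnessOut_splitInteger.1 ∧ splitInteger_alt (pvDiffWitness_splitInteger.1) (pvDiffWitness_splitInteger.2) = pvDiffWitnessOut_splitInteger.2 ∧ pvDiffWitnessOut_splitInteger.1 ≠ pvDiffWitnessOut_splitInteger.2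
def Claim_exact_splitInteger : Prop := ∀ (num : Int) (parts : Int), Dom_splitInteger num parts → Pre_splitInteger num parts → D_splitInteger num parts → splitInteger num parts ≠ splitInteger_alt num parts

-- ===== LEMMAS AND PROOFS =====

-- accumulator-free form of B's loop, for the proofs
def pvSplitBGo : Nat → Int → Int → List Int
  | 0, _, _ => []
  | n + 1, num, parts =>
      if parts ≤ 0 then []
      else
        let first := -(PySem.Int.floordiv (-num) parts)
        first :: pvSplitBGo n (num - first) (parts - 1)

theorem pvSplitBAcc_eq : ∀ (n : Nat) (num parts : Int) (res : List Int),
    pvSplitBAcc n num parts res = res ++ pvSplitBGo n num parts := by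
  intro n
  induction n with
  | zero => intro num parts res; simp [pvSplitBAcc, pvSplitBGo]
  | succ n ih =>
    intro num parts res
    by_cases h : parts ≤ 0
    · simp [pvSplitBAcc, pvSplitBGo, h]
    · simp only [pvSplitBAcc, pvSplitBGo, if_neg h, ih]
      simp

-- incrementing the first r cells of ys ++ [q]*m, starting at index ys.length
theorem pvIncLoop_invariant (q : Int) :
    ∀ (r m : Nat) (ys : List Int), r ≤ m →
      pvIncLoop (ys ++ List.replicate m q) ys.length r
        = ys ++ List.replicate r (q + 1) ++ List.replicate (m - r) q := by
  intro r
  induction r with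
  | zero => intro m ys _; simp [pvIncLoop]
  | succ r ih =>
    intro m ys hrm
    obtain ⟨m', rfl⟩ : ∃ m', m = m' + 1 := ⟨m - 1, by omega⟩
    have hset : (ys ++ List.replicate (m' + 1) q).set ys.length
        ((ys ++ List.replicate (m' + 1) q).getD ys.length 0 + 1)
        = (ys ++ [q + 1]) ++ List.replicate m' q := by
      simp [List.replicate_succ, List.getD, List.set_append_right _ _ (le_refl _)]
    have ih' := ih m' (ys ++ [q + 1]) (by omega)
    simp only [pvIncLoop, hset]
    rw [show ys.length + 1 = (ys ++ [q + 1]).length by simp] at *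
    rw [ih']
    simp [List.replicate_succ, List.append_assoc]

-- A in closed form: first rem entries q+1, rest q, with q = trunc(num/parts), rem = num % parts
theorem splitInteger_closed (num parts : Int) (hp : parts ≠ 0) :
    splitInteger num parts
      = List.replicate (PySem.Int.mod num parts).toNat (PySem.Int.truncdiv num parts + 1)
        ++ List.replicate (parts - PySem.Int.mod num parts).toNat (PySem.Int.truncdiv num parts) := by
  unfold splitInteger
  simp only []
  set rem := PySem.Int.mod num parts with hrem
  set q := PySem.Int.truncdiv num parts with hq
  rcases lt_or_gt_of_ne hp with hneg | hpos
  · have hb := PySem.Int.mod_neg_bounds num hneg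
    rw [PySem.List.pyRange_one_eq_nil (by omega)]
    have h1 : rem.toNat = 0 := by omega
    have h2 : (parts - rem).toNat = 0 := by omega
    split <;> simp [pvIncLoop, h1, h2]
  · have h0 := PySem.Int.mod_nonneg num hpos
    have h1 := PySem.Int.mod_lt num hpos
    have hmap : (PySem.List.pyRange 0 parts 1).map (fun _ => q) = List.replicate parts.toNat q := by
      rw [PySem.List.pyRange_one]
      simp [List.eq_replicate_iff]
    rw [hmap]
    split
    · rename_i h; rw [h]; simp
    · have := pvIncLoop_invariant q rem.toNat parts.toNat ([]) (by omega)
      simpa [show (parts.toNat - rem.toNat : Nat) = (parts - rem).toNat by omega] using this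

-- characterisation of Euclidean division by a positive divisor
theorem pv_ediv_char (a b c : Int) (hb : 0 < b) (h1 : c * b ≤ a) (h2 : a < (c + 1) * b) :
    a / b = c :=
  ((Int.ediv_emod_unique (a := a) (b := b) (r := a - b * c) (q := c) hb).mpr
    ⟨by ring, by nlinarith, by nlinarith⟩).1

theorem pvSplitBGo_nonpos : ∀ (n : Nat) (num parts : Int), parts ≤ 0 → pvSplitBGo n num parts = [] := by
  intro n num parts h
  cases n <;> simp [pvSplitBGo, h]

-- B in closed form: first num%parts entries (num//parts)+1, rest num//parts (floor division)
theorem pvSplitBGo_closed :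
    ∀ (n : Nat) (num parts : Int), parts.toNat = n → 0 < parts →
      pvSplitBGo n num parts
        = List.replicate (num % parts).toNat (num / parts + 1)
          ++ List.replicate (parts - num % parts).toNat (num / parts) := by
  intro n
  induction n with
  | zero => intro num parts hn hp; omega
  | succ n ih =>
    intro num parts hn hp
    have hnot : ¬ parts ≤ 0 := by omega
    simp only [pvSplitBGo, if_neg hnot]
    have hfd : PySem.Int.floordiv (-num) parts = (-num) / parts :=
      PySem.Int.floordiv_eq_ediv_of_pos hp
    set f := num / parts with hf
    set r := num % parts with hr
    have hsum : parts * f + r = num := Int.ediv_add_emod num parts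
    have hr0 : 0 ≤ r := Int.emod_nonneg num (by omega)
    have hrlt : r < parts := Int.emod_lt_of_pos num hp
    by_cases hrz : r = 0
    · -- divisible: first = f, remainder stays divisible
      have hfirst : -((-num) / parts) = f := by
        have : (-num) / parts = -f := pv_ediv_char (-num) parts (-f) hp (by nlinarith) (by nlinarith)
        omega
      rw [hfd, hfirst]
      by_cases h1 : parts = 1
      · subst h1
        have hfn : f = num := by omega
        rw [show (1 : Int) - 1 = 0 by norm_num, pvSplitBGo_nonpos n (num - f) 0 le_rfl]
        simp [hrz, hfn]
      · have hp' : 0 < parts - 1 := by omega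
        have hd : (num - f) / (parts - 1) = f :=
          pv_ediv_char _ _ _ hp' (by nlinarith) (by nlinarith)
        have hm : (num - f) % (parts - 1) = 0 := by
          have := Int.ediv_add_emod (num - f) (parts - 1)
          rw [hd] at this; nlinarith
        rw [ih (num - f) (parts - 1) (by omega) hp', hd, hm]
        rw [hrz]
        simp only [Int.sub_zero, Int.toNat_zero, List.replicate_zero, List.nil_append]
        rw [show parts.toNat = (parts - 1).toNat + 1 by omega, List.replicate_succ]
    · -- not divisible: first = f + 1, remainder loses one unit of the residue
      have hrpos : 0 < r := by omega
      have hfirst : -((-num) / parts) = f + 1 := by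
        have : (-num) / parts = -f - 1 := pv_ediv_char (-num) parts (-f - 1) hp (by nlinarith) (by nlinarith)
        omega
      rw [hfd, hfirst]
      have hp' : 0 < parts - 1 := by omega
      have hd : (num - (f + 1)) / (parts - 1) = f :=
        pv_ediv_char _ _ _ hp' (by nlinarith) (by nlinarith)
      have hm : (num - (f + 1)) % (parts - 1) = r - 1 := by
        have := Int.ediv_add_emod (num - (f + 1)) (parts - 1)
        rw [hd] at this; nlinarith
      rw [ih (num - (f + 1)) (parts - 1) (by omega) hp', hd, hm]
      rw [show r.toNat = (r - 1).toNat + 1 by omega, List.replicate_succ,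
          show (parts - 1 - (r - 1)) = parts - r by ring]
      simp

theorem splitInteger_alt_closed (num parts : Int) (hp : 0 < parts) :
    splitInteger_alt num parts
      = List.replicate (PySem.Int.mod num parts).toNat (PySem.Int.floordiv num parts + 1)
        ++ List.replicate (parts - PySem.Int.mod num parts).toNat (PySem.Int.floordiv num parts) := by
  unfold splitInteger_alt
  rw [pvSplitBAcc_eq, List.nil_append, pvSplitBGo_closed parts.toNat num parts rfl hp,
      PySem.Int.floordiv_eq_ediv_of_pos hp, PySem.Int.mod_eq_emod_of_pos hp]

theorem splitInteger_alt_nonpos (num parts : Int) (hp : parts ≤ 0) :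
    splitInteger_alt num parts = [] := by
  unfold splitInteger_alt
  rw [pvSplitBAcc_eq, List.nil_append, pvSplitBGo_nonpos _ _ _ hp]

-- trunc and floor quotients agree when num ≥ 0 or parts ∣ num
theorem pv_trunc_eq_floor (num parts : Int) (hp : 0 < parts) (h : 0 ≤ num ∨ parts ∣ num) :
    PySem.Int.truncdiv num parts = PySem.Int.floordiv num parts := by
  rw [PySem.Int.floordiv_eq_ediv_of_pos hp]
  show num.tdiv parts = num / parts
  rcases h with h | h
  · exact Int.tdiv_eq_ediv_of_nonneg h
  · obtain ⟨k, rfl⟩ := h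
    rw [Int.mul_tdiv_cancel_left _ (by omega), Int.mul_ediv_cancel_left _ (by omega)]

-- inside D_ the trunc quotient is one above the floor quotient
theorem pv_trunc_eq_floor_add_one (num parts : Int) (hp : 0 < parts) (hn : num < 0)
    (hnd : ¬ parts ∣ num) :
    PySem.Int.truncdiv num parts = PySem.Int.floordiv num parts + 1 := by
  rw [PySem.Int.floordiv_eq_ediv_of_pos hp]
  show num.tdiv parts = num / parts + 1
  set f := num / parts with hf
  set r := num % parts with hr
  have hsum : parts * f + r = num := Int.ediv_add_emod num parts
  have hr0 : 0 ≤ r := Int.emod_nonneg num (by omega)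
  have hrlt : r < parts := Int.emod_lt_of_pos num hp
  have hrz : r ≠ 0 := fun h => hnd (Int.dvd_of_emod_eq_zero (by omega))
  have hrpos : 0 < r := by omega
  have h1 : num.tdiv parts = -((-num).tdiv parts) := by
    have := Int.neg_tdiv num parts; omega
  have h2 : (-num).tdiv parts = (-num) / parts :=
    Int.tdiv_eq_ediv_of_nonneg (by omega)
  have h3 : (-num) / parts = -f - 1 :=
    pv_ediv_char (-num) parts (-f - 1) hp (by nlinarith) (by nlinarith)
  omega

-- ===== VERDICT =====
theorem splitInteger_spec : Claim_unchanged_splitInteger := by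
  intro num parts _ hpre
  unfold Spec_splitInteger
  intro hnd
  rcases lt_or_gt_of_ne hpre with hneg | hpos
  · rw [splitInteger_closed num parts hpre, splitInteger_alt_nonpos num parts (by omega)]
    have hb := PySem.Int.mod_neg_bounds num hneg
    have h1 : (PySem.Int.mod num parts).toNat = 0 := by omega
    have h2 : (parts - PySem.Int.mod num parts).toNat = 0 := by omega
    simp [h1, h2]
  · have h : 0 ≤ num ∨ parts ∣ num := by
      unfold D_splitInteger at hnd
      push_neg at hnd
      by_cases h0 : 0 ≤ num
      · exact Or.inl h0
      · exact Or.inr (hnd (by omega) hpos)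
    rw [splitInteger_closed num parts hpre, splitInteger_alt_closed num parts hpos,
        pv_trunc_eq_floor num parts hpos h]

theorem splitInteger_changed : Claim_changed_splitInteger := by
  unfold Claim_changed_splitInteger; decide

theorem splitInteger_tight : Claim_exact_splitInteger := by
  intro num parts _ hpre hd
  obtain ⟨hn, hpos, hnd⟩ := hd
  rw [splitInteger_closed num parts hpre, splitInteger_alt_closed num parts hpos,
      pv_trunc_eq_floor_add_one num parts hpos hn hnd]
  have h0 := PySem.Int.mod_nonneg num hpos
  have hrz : PySem.Int.mod num parts ≠ 0 := by
    exact fun h => hnd ((PySem.Int.mod_eq_zero_iff_dvd _ _).mp h)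
  intro heq
  have := congrArg List.head? heq
  rw [show (PySem.Int.mod num parts).toNat = (PySem.Int.mod num parts).toNat - 1 + 1 by omega] at this
  simp [List.replicate_succ] at this
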